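-- pv_equiv track=rewrite | github.com/vpumeyyv/SChem-Discord-Bot | tournament_base.py | sorted_and_ranked
-- ===== SOURCE A (Python) =====
-- def sorted_and_ranked(rows, sort_idx=-1, desc=False):
--     """Given an iterable of rows containing strings or numeric types, return a list of them sorted on the given
--     numeric column and with a rank prepended to each row.
--     """
--     last_score = None
--     ranked_rows = []
--     for i, row in enumerate(sorted(rows, key=lambda r: r[sort_idx], reverse=desc)):
--         # Only increment rank if we didn't tie the previous value
--         if row[sort_idx] != last_score:
--             rank = i + 1
--             last_score = row[sort_idx]
--
--         ranked_rows.append([rank] + list(row))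
--
--     return ranked_rows
-- ===== SOURCE B (Python) =====
-- def sorted_and_ranked(rows, sort_idx=-1, desc=False):
--     """Sort rows on the given column and prepend 1-based competition ranks (ties share a rank).
--
--     Run-grouping decomposition: walk the sorted list run by run (a run = a maximal
--     block of equal scores) and give every row of a run the rank of the run's start.
--     """
--     srt = sorted(rows, key=lambda r: r[sort_idx], reverse=desc)
--     out = []
--     pos = 0
--     while srt:
--         head, srt = srt[0], srt[1:]
--         score = head[sort_idx]
--         run = [head]
--         while srt and srt[0][sort_idx] == score:
--             run.append(srt[0])
--             srt = srt[1:]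
--         out += [[pos + 1] + list(r) for r in run]
--         pos += len(run)
--     return out
-- ===== Notes on version B (the rewrite author's own statement) =====
-- stated objective: alternative
-- what changed: A's single stateful pass carrying last_score/rank over the sorted rows is replaced by a run-grouping walk: each maximal block of equal scores is collected and all its rows get the rank of the block's start position.
import Mathlib
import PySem

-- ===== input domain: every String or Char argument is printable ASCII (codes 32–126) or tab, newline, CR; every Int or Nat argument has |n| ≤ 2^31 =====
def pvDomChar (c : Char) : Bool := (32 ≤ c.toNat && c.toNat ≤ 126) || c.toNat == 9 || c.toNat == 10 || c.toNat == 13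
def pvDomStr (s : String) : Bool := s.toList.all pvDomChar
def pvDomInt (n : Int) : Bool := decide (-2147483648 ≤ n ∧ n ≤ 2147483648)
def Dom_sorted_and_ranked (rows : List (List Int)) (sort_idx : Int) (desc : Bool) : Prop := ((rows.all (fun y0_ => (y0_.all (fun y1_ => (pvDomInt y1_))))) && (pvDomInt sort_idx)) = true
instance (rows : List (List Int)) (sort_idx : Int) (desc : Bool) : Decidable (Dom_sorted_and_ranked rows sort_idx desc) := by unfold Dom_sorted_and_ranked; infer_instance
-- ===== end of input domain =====

-- B replaces A's stateful last_score/rank loop by a run-grouping walk over the sorted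
-- list (each maximal block of equal scores gets the rank of its start); same cost,
-- objective: alternative decomposition.

-- ===== PORT A =====
-- row[sort_idx]; under Pre_ the index is always in range, so the default is never used
def pvKeyA (sort_idx : Int) (r : List Int) : Int := (PySem.List.pyGet? r sort_idx).getD 0

-- the 'for i, row in enumerate(...)' loop with its state (last_score, rank); rank starts
-- unbound in Python and is always assigned on the first iteration (last_score is None),
-- so the initial rank argument 0 is never emitted
def pvLoopA (sort_idx : Int) : List (List Int) → Int → Option Int → Int → List (List Int)
  | [], _, _, _ => []
  | row :: rest, i, last_score, rank =>
      if some (pvKeyA sort_idx row) ≠ last_score then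
        ((i + 1) :: row) :: pvLoopA sort_idx rest (i + 1) (some (pvKeyA sort_idx row)) (i + 1)
      else
        (rank :: row) :: pvLoopA sort_idx rest (i + 1) last_score rank

def sorted_and_ranked (rows : List (List Int)) (sort_idx : Int) (desc : Bool) : List (List Int) :=
  pvLoopA sort_idx (PySem.List.sorted rows (fun r => pvKeyA sort_idx r) desc) 0 none 0

-- ===== PORT B =====
def pvKeyB (sort_idx : Int) (r : List Int) : Int := (PySem.List.pyGet? r sort_idx).getD 0

-- the inner 'while srt and srt[0][sort_idx] == score' loop: (collected run tail, rest)
def pvTakeRun (sort_idx score : Int) : List (List Int) → List (List Int) × List (List Int)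
  | [] => ([], [])
  | r :: rest =>
      if pvKeyB sort_idx r = score then
        let p := pvTakeRun sort_idx score rest
        (r :: p.1, p.2)
      else ([], r :: rest)

theorem pvTakeRun_snd_length (sort_idx score : Int) (l : List (List Int)) :
    (pvTakeRun sort_idx score l).2.length ≤ l.length := by
  induction l with
  | nil => simp [pvTakeRun]
  | cons r rest ih =>
      simp only [pvTakeRun]
      split
      · exact le_trans ih (by simp)
      · simp

-- the outer 'while srt' loop, carrying pos
def pvLoopB (sort_idx : Int) : List (List Int) → Int → List (List Int)
  | [], _ => []
  | head :: srt, pos =>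
      let p := pvTakeRun sort_idx (pvKeyB sort_idx head) srt
      ((head :: p.1).map (fun r => (pos + 1) :: r)) ++
        pvLoopB sort_idx p.2 (pos + (1 + (p.1.length : Int)))
  termination_by l _ => l.length
  decreasing_by
    exact Nat.lt_succ_of_le (pvTakeRun_snd_length _ _ _)

def sorted_and_ranked_alt (rows : List (List Int)) (sort_idx : Int) (desc : Bool) : List (List Int) :=
  pvLoopB sort_idx (PySem.List.sorted rows (fun r => pvKeyB sort_idx r) desc) 0

-- ===== PRECONDITION & SPEC =====
-- Pre_ excludes exactly the inputs where Python A raises IndexError: some row does not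
-- admit the index sort_idx (the key lambda or row[sort_idx] in the loop raises there).
def Pre_sorted_and_ranked (rows : List (List Int)) (sort_idx : Int) (desc : Bool) : Prop :=
  ∀ row ∈ rows, PySem.Raise.InRange row.length sort_idx
instance (rows : List (List Int)) (sort_idx : Int) (desc : Bool) : Decidable (Pre_sorted_and_ranked rows sort_idx desc) := by unfold Pre_sorted_and_ranked; infer_instance

def pvWitness_sorted_and_ranked : List (List Int) × Int × Bool := ([[3, 1], [2, 1], [5, 0]], -1, true)

def Spec_sorted_and_ranked (rows : List (List Int)) (sort_idx : Int) (desc : Bool) (out : List (List Int)) : Prop := out = sorted_and_ranked_alt rows sort_idx desc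
instance (rows : List (List Int)) (sort_idx : Int) (desc : Bool) (out : List (List Int)) : Decidable (Spec_sorted_and_ranked rows sort_idx desc out) := by unfold Spec_sorted_and_ranked; infer_instance

-- ===== CLAIM (what is proved, stated in full; the proofs are below) =====
def Claim_equal_sorted_and_ranked : Prop := ∀ (rows : List (List Int)) (sort_idx : Int) (desc : Bool), Dom_sorted_and_ranked rows sort_idx desc → Pre_sorted_and_ranked rows sort_idx desc → Spec_sorted_and_ranked rows sort_idx desc (sorted_and_ranked rows sort_idx desc)

-- ===== LEMMAS AND PROOFS =====

theorem pvKeyB_eq : pvKeyB = pvKeyA := rfl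

theorem pvTakeRun_decomp (sort_idx score : Int) (l : List (List Int)) :
    l = (pvTakeRun sort_idx score l).1 ++ (pvTakeRun sort_idx score l).2 ∧
    (∀ r ∈ (pvTakeRun sort_idx score l).1, pvKeyA sort_idx r = score) ∧
    (∀ r, (pvTakeRun sort_idx score l).2.head? = some r → pvKeyA sort_idx r ≠ score) := by
  induction l with
  | nil => simp [pvTakeRun]
  | cons r rest ih =>
      simp only [pvTakeRun]
      split
      · rename_i h
        refine ⟨?_, ?_, ih.2.2⟩
        · simpa using ih.1
        · intro x hx
          rcases List.mem_cons.mp hx with hx | hx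
          · subst hx; exact h
          · exact ih.2.1 x hx
      · rename_i h
        exact ⟨rfl, by simp, by intro x hx; simp at hx; subst hx; exact h⟩

-- within a run all scores equal the tracked last_score, so A keeps emitting rank
theorem pvLoopA_run (sort_idx k rank : Int) (run rest : List (List Int)) (i : Int)
    (hrun : ∀ r ∈ run, pvKeyA sort_idx r = k) :
    pvLoopA sort_idx (run ++ rest) i (some k) rank =
      run.map (fun r => rank :: r) ++ pvLoopA sort_idx rest (i + run.length) (some k) rank := by
  induction run generalizing i with
  | nil => simp
  | cons r run' ih =>
      have hr : pvKeyA sort_idx r = k := hrun r (by simp)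
      have htail : ∀ x ∈ run', pvKeyA sort_idx x = k :=
        fun x hx => hrun x (List.mem_cons_of_mem _ hx)
      simp only [List.cons_append, pvLoopA, hr]
      rw [if_neg (by simp)]
      rw [ih (i + 1) htail]
      simp only [List.map_cons, List.cons_append, List.length_cons]
      congr 2
      push_cast
      ring_nf

-- the heart: A's stateful pass equals B's run walk on ANY list, as long as the tracked
-- last_score differs from the head's score (true initially: last_score is none)
theorem pvLoopA_eq_pvLoopB (sort_idx : Int) (s : List (List Int)) (i : Int)
    (last : Option Int) (rank : Int)
    (h : ∀ r, s.head? = some r → last ≠ some (pvKeyA sort_idx r)) :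
    pvLoopA sort_idx s i last rank = pvLoopB sort_idx s i := by
  match s with
  | [] => simp [pvLoopA, pvLoopB]
  | head :: srt =>
    obtain ⟨hdec, hrun, hrest⟩ := pvTakeRun_decomp sort_idx (pvKeyA sort_idx head) srt
    have hne : last ≠ some (pvKeyA sort_idx head) := h head rfl
    have hrec :
        pvLoopA sort_idx (pvTakeRun sort_idx (pvKeyA sort_idx head) srt).2
            (i + (1 + ((pvTakeRun sort_idx (pvKeyA sort_idx head) srt).1.length : Int)))
            (some (pvKeyA sort_idx head)) (i + 1) =
        pvLoopB sort_idx (pvTakeRun sort_idx (pvKeyA sort_idx head) srt).2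
            (i + (1 + ((pvTakeRun sort_idx (pvKeyA sort_idx head) srt).1.length : Int))) :=
      pvLoopA_eq_pvLoopB sort_idx _ _ _ _
        (by intro r hr hcontra
            exact hrest r hr (by simpa using hcontra.symm))
    rw [pvLoopB, pvKeyB_eq]
    simp only [pvLoopA, if_pos hne.symm]
    conv_lhs => rw [hdec]
    rw [pvLoopA_run sort_idx (pvKeyA sort_idx head) (i + 1)
          (pvTakeRun sort_idx (pvKeyA sort_idx head) srt).1
          (pvTakeRun sort_idx (pvKeyA sort_idx head) srt).2 (i + 1) hrun]
    have harith : i + 1 + ((pvTakeRun sort_idx (pvKeyA sort_idx head) srt).1.length : Int)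
        = i + (1 + ((pvTakeRun sort_idx (pvKeyA sort_idx head) srt).1.length : Int)) := by ring
    rw [harith, hrec]
    simp only [List.map_cons, List.cons_append]
termination_by s.length
decreasing_by
  exact Nat.lt_succ_of_le (pvTakeRun_snd_length _ _ _)

-- ===== VERDICT (by name: the statement is the Claim_ definition above) =====
theorem sorted_and_ranked_spec : Claim_equal_sorted_and_ranked := by
  intro rows sort_idx desc _ _
  unfold Spec_sorted_and_ranked sorted_and_ranked sorted_and_ranked_alt
  rw [pvKeyB_eq]
  exact (pvLoopA_eq_pvLoopB sort_idx (PySem.List.sorted rows (fun r => pvKeyA sort_idx r) desc)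
    0 none 0 (fun r _ => by simp))
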